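-- pv_equiv track=rewrite | github.com/Petra313/bioinf | CH3/ba3c.py | dictOverlap
-- ===== SOURCE A (Python) =====
-- def createDict(dna_string):
--     dictionary={}
--     for dna in dna_string:
--         dictionary.update({dna:''})
--     return dictionary
--
-- def dictOverlap(dna):
--     dic=createDict(dna)
--     for d in dic.keys():
--         val=[]
--         for d_1 in dic.keys():
--             if d[1:]==d_1[:-1]:
--                 val.append(d_1)
--         dic.update({d:val})
--     return dic
-- ===== SOURCE B (Python) =====
-- def dictOverlap(dna):
--     keys = list(dict.fromkeys(dna))
--     index = {}
--     for d1 in keys: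
--         index.setdefault(d1[:-1], []).append(d1)
--     return {d: list(index.get(d[1:], [])) for d in keys}
-- ===== Notes on version B (the rewrite author's own statement) =====
-- stated objective: faster
-- what changed: Instead of scanning all keys for each key (nested loops), B builds a dict indexing each k-mer by its prefix in one pass and looks each suffix up once.
import Mathlib
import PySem

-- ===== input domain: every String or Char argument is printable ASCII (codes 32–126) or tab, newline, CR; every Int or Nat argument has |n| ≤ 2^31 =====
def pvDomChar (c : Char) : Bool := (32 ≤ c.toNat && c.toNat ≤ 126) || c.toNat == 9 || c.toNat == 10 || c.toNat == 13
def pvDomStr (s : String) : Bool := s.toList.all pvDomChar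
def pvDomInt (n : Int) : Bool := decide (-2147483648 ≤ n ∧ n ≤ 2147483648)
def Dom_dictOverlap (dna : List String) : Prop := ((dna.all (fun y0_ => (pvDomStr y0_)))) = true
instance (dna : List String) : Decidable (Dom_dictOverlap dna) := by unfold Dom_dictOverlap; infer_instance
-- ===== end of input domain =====

-- B replaces A's quadratic all-pairs suffix/prefix scan by a dict indexing the k-mers by their prefix, looked up once per suffix; equal output proved.

-- ===== PORT A =====
-- shared slice helpers: d[1:] and d[:-1] as Python computes them (on the char list)
def pyRest (s : String) : List Char := PySem.List.slice s.toList (some 1) none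
def pyInit (s : String) : List Char := PySem.List.slice s.toList none (some (-1))

-- Python's value placeholder '' is never returned (every value is overwritten below); it is modelled as []
def createDict (dna_string : List String) : PySem.Dict String (List String) :=
  dna_string.foldl (fun dictionary dna => dictionary.insert dna []) PySem.Dict.empty

-- the outer 'for d in dic.keys()' iterates a live view, but the loop only overwrites values,
-- so the key list is fixed; the inner 'for d_1 in dic.keys()' reads the current dict (acc)
def dictOverlap (dna : List String) : List (String × List String) :=
  let dic := createDict dna
  (dic.keys.foldl
    (fun acc d =>
      acc.insert d
        (acc.keys.foldl (fun val d_1 => if pyRest d = pyInit d_1 then val ++ [d_1] else val) []))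
    dic).items

-- ===== PORT B =====
def dictOverlap_alt (dna : List String) : List (String × List String) :=
  let keys := PySem.List.dedup dna
  let index := keys.foldl (fun idx d1 => idx.modify (pyInit d1) [] (· ++ [d1])) PySem.Dict.empty
  keys.map (fun d => (d, index.getD (pyRest d) []))

-- ===== PRECONDITION & SPEC =====
def Spec_dictOverlap (dna : List String) (out : List (String × List String)) : Prop := out = dictOverlap_alt dna
instance (dna : List String) (out : List (String × List String)) : Decidable (Spec_dictOverlap dna out) := by unfold Spec_dictOverlap; infer_instance

-- ===== CLAIM (what is proved, stated in full; the proofs are below) =====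
def Claim_equal_dictOverlap : Prop := ∀ (dna : List String), Dom_dictOverlap dna → Spec_dictOverlap dna (dictOverlap dna)

-- ===== LEMMAS AND PROOFS =====

-- the common value both programs assign to key d
def overlapVal (keys : List String) (d : String) : List String :=
  keys.filter (fun d1 => pyInit d1 == pyRest d)

lemma innerA_eq (acc : PySem.Dict String (List String)) (keys : List String) (d : String)
    (h : acc.keys = keys) :
    acc.keys.foldl (fun val d_1 => if pyRest d = pyInit d_1 then val ++ [d_1] else val) []
      = overlapVal keys d := by
  subst h
  have hfun : (fun (val : List String) d_1 => if pyRest d = pyInit d_1 then val ++ [d_1] else val)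
      = (fun val d_1 => if (fun x => pyInit x == pyRest d) d_1 = true then val ++ [id d_1] else val) := by
    funext v x
    by_cases hx : pyRest d = pyInit x
    · simp [hx]
    · simp [hx, Ne.symm hx]
  rw [hfun, PySem.List.foldl_append_if, List.map_id]
  rfl

lemma items_createDict_aux : ∀ (dna : List String) (K : List String),
    (dna.foldl (fun dic s => dic.insert s ([] : List String))
        (PySem.Dict.mk (K.map (fun k => (k, ([] : List String)))))).items
      = (PySem.Set.update K dna).map (fun k => (k, ([] : List String))) := by
  intro dna
  induction dna with
  | nil => intro K; simp [PySem.Set.update]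
  | cons s rest ih =>
    intro K
    have hc : (PySem.Dict.mk (K.map (fun k => (k, ([] : List String))))).contains s
        = decide (s ∈ K) := by
      by_cases h : s ∈ K
      · simp [PySem.Dict.contains, List.any_map, Function.comp_def, h]
      · simp [PySem.Dict.contains, List.any_map, Function.comp_def, h]
        exact fun x hx hxs => h (hxs ▸ hx)
    by_cases hmem : s ∈ K
    · have hct : (PySem.Dict.mk (K.map (fun k => (k, ([] : List String))))).contains s = true := by
        rw [hc]; simp [hmem]
      have hins : (PySem.Dict.mk (K.map (fun k => (k, ([] : List String))))).insert s []
          = PySem.Dict.mk (K.map (fun k => (k, ([] : List String)))) := by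
        apply PySem.Dict.ext
        rw [PySem.Dict.items_insert_of_contains _ _ hct]
        simp only [List.map_map]
        apply List.map_congr_left
        intro a _
        by_cases ha : a = s
        · simp [ha]
        · simp [ha]
      have hadd : PySem.Set.add K s = K := by
        simp [PySem.Set.add, hmem]
      simp only [List.foldl_cons, hins, PySem.Set.update, List.foldl_cons, hadd] at *
      exact ih K
    · have hcf : (PySem.Dict.mk (K.map (fun k => (k, ([] : List String))))).contains s = false := by
        rw [hc]; simp [hmem]
      have hins : (PySem.Dict.mk (K.map (fun k => (k, ([] : List String))))).insert s []
          = PySem.Dict.mk ((K ++ [s]).map (fun k => (k, ([] : List String)))) := by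
        apply PySem.Dict.ext
        rw [PySem.Dict.items_insert_of_not_contains _ _ hcf]
        simp
      have hadd : PySem.Set.add K s = K ++ [s] := by
        simp [PySem.Set.add]
        exact hmem
      simp only [List.foldl_cons, hins, PySem.Set.update, hadd] at *
      exact ih (K ++ [s])

lemma items_createDict (dna : List String) :
    (createDict dna).items = (PySem.List.dedup dna).map (fun k => (k, ([] : List String))) := by
  have := items_createDict_aux dna []
  simpa [createDict, PySem.Dict.empty, PySem.List.dedup, PySem.Set.ofList, PySem.Set.update,
    PySem.Set.empty] using this

lemma keys_createDict (dna : List String) :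
    (createDict dna).keys = PySem.List.dedup dna := by
  simp [PySem.Dict.keys, items_createDict, List.map_map, Function.comp_def, PySem.List.dedup]

lemma loopA (keys : List String) :
    ∀ (l : List String) (acc : PySem.Dict String (List String)),
    acc.keys = keys → l.Nodup → (∀ k ∈ l, k ∈ keys) →
    (l.foldl
      (fun acc d =>
        acc.insert d
          (acc.keys.foldl (fun val d_1 => if pyRest d = pyInit d_1 then val ++ [d_1] else val) []))
      acc).items
    = acc.items.map (fun p => if p.1 ∈ l then (p.1, overlapVal keys p.1) else p) := by
  intro l
  induction l with
  | nil => intro acc _ _ _; simp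
  | cons d rest ih =>
    intro acc hkeys hnd hsub
    have hval := innerA_eq acc keys d hkeys
    have hd : d ∈ keys := hsub d (List.mem_cons_self ..)
    have hct : acc.contains d = true := by
      rw [PySem.Dict.contains_iff_mem_keys, hkeys]; exact hd
    have hkeys' : (acc.insert d (overlapVal keys d)).keys = keys := by
      rw [PySem.Dict.keys_insert_of_contains _ _ hct, hkeys]
    have hitems' := PySem.Dict.items_insert_of_contains acc (overlapVal keys d) hct
    rw [List.foldl_cons, hval, ih _ hkeys' hnd.of_cons (fun k hk => hsub k (List.mem_cons_of_mem _ hk)),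
      hitems', List.map_map]
    apply List.map_congr_left
    intro p _
    by_cases hp : p.1 = d
    · have hdr : d ∉ rest := (List.nodup_cons.mp hnd).1
      have : (p.1 == d) = true := by simp [hp]
      simp only [Function.comp, this, if_true]
      simp [hp, hdr]
    · have : (p.1 == d) = false := by simp [hp]
      simp only [Function.comp, this, Bool.false_eq_true, if_false]
      by_cases hr : p.1 ∈ rest <;> simp [hr, hp]

lemma altVal (keys : List String) (d : String) :
    (keys.foldl (fun idx d1 => idx.modify (pyInit d1) [] (· ++ [d1])) PySem.Dict.empty).getD
        (pyRest d) []
      = overlapVal keys d := by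
  have hmap : keys.foldl (fun idx d1 => idx.modify (pyInit d1) [] (· ++ [d1]))
        (PySem.Dict.empty : PySem.Dict (List Char) (List String))
      = ((keys.map (fun d1 => (pyInit d1, d1))).foldl
          (fun idx p => idx.modify p.1 [] (· ++ [p.2])) PySem.Dict.empty) :=
    (List.foldl_map (f := fun d1 => (pyInit d1, d1))
      (g := fun idx p => idx.modify p.1 [] (· ++ [p.2]))
      (l := keys) (init := PySem.Dict.empty)).symm
  rw [hmap, PySem.Dict.getD_foldl_modify_append, PySem.Dict.getD_empty, List.filter_map,
    List.map_map]
  simp [overlapVal, Function.comp_def]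

-- ===== VERDICT (by name: the statement is the Claim_ definition above) =====
theorem dictOverlap_spec : Claim_equal_dictOverlap := by
  intro dna _
  show dictOverlap dna = dictOverlap_alt dna
  unfold dictOverlap dictOverlap_alt
  simp only []
  rw [keys_createDict,
    loopA (PySem.List.dedup dna) (PySem.List.dedup dna) (createDict dna) (keys_createDict dna)
      (PySem.Set.nodup_ofList dna) (fun _ hk => hk),
    items_createDict, List.map_map]
  apply List.map_congr_left
  intro k hk
  simp only [Function.comp, hk, if_true]
  rw [altVal]
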